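-- pv_equiv track=rewrite | github.com/flowersteam/value_stability | evaluate_v3.py | create_simulated_messages
-- ===== SOURCE A (Python) =====
-- def create_simulated_messages(conv, last="user"):
--     # simulate a conversation between two LLMs
--     if last == "user":
--         # last role is user
--         sim_conv = list(zip(["user", "assistant"] * (len(conv) // 2 + 1), conv[::-1]))[::-1]
--     elif last == "assistant":
--         # last role is assistant
--         sim_conv = list(zip(["assistant", "user"] * (len(conv) // 2 + 1), conv[::-1]))[::-1]
--     else:
--         raise ValueError("last must be either user or assistant")
--
--     sim_conv_messages = [{"role": role, "content": msg} for role, msg in sim_conv]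
--
--     return sim_conv_messages
-- ===== SOURCE B (Python) =====
-- def create_simulated_messages(conv, last="user"):
--     # simulate a conversation between two LLMs
--     if last == "user":
--         other = "assistant"
--     elif last == "assistant":
--         other = "user"
--     else:
--         raise ValueError("last must be either user or assistant")
--     n = len(conv)
--     return [{"role": last if (n - 1 - i) % 2 == 0 else other, "content": msg}
--             for i, msg in enumerate(conv)]
-- ===== Notes on version B (the rewrite author's own statement) =====
-- stated objective: simpler
-- what changed: B replaces A's reverse -> zip-with-repeated-role-list -> reverse construction by a single forward pass that picks each role from the parity of the distance to the end of the list.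
import Mathlib
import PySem

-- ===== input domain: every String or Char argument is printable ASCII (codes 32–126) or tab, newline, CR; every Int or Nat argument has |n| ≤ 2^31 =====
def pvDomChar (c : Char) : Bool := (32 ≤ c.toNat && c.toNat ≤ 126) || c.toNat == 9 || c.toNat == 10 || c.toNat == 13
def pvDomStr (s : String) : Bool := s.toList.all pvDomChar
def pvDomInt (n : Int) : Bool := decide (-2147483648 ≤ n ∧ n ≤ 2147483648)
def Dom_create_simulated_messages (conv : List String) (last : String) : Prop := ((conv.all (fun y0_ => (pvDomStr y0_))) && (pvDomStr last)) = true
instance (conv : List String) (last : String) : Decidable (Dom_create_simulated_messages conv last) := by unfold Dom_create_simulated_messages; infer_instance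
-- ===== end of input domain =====

-- ===== PORT A =====
-- B changes the construction (end-anchored parity, one forward pass) for simplicity;
-- A's reverse/zip/reverse build is ported literally.
-- Python `lst * k` for a list literal and k = len(conv)//2 + 1 (always nonnegative, so Nat division is exact here)
def pyListMul {α : Type} (l : List α) (k : Nat) : List α := (List.replicate k l).flatten

def create_simulated_messages (conv : List String) (last : String) : List (List (String × String)) :=
  let sim_conv : List (String × String) :=
    if last = "user" then
      ((pyListMul ["user", "assistant"] (conv.length / 2 + 1)).zip conv.reverse).reverse
    else if last = "assistant" then
      ((pyListMul ["assistant", "user"] (conv.length / 2 + 1)).zip conv.reverse).reverse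
    else
      []  -- Python raises ValueError here; excluded by Pre_
  sim_conv.map (fun rm => [("role", rm.1), ("content", rm.2)])

-- ===== PORT B =====
def create_simulated_messages_alt (conv : List String) (last : String) : List (List (String × String)) :=
  if last = "user" ∨ last = "assistant" then
    let other : String := if last = "user" then "assistant" else "user"
    let n := conv.length
    -- (n - 1 - i) is nonnegative for every produced index, so Nat subtraction/mod are exact
    conv.mapIdx (fun i msg =>
      [("role", if (n - 1 - i) % 2 = 0 then last else other), ("content", msg)])
  else
    []  -- Python raises ValueError here; excluded by Pre_

-- ===== PRECONDITION & SPEC =====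
-- Pre_ excludes exactly the inputs on which A (and B) raise ValueError: any `last` other than "user"/"assistant".
def Pre_create_simulated_messages (conv : List String) (last : String) : Prop :=
  last = "user" ∨ last = "assistant"
instance (conv : List String) (last : String) : Decidable (Pre_create_simulated_messages conv last) := by
  unfold Pre_create_simulated_messages; infer_instance

def pvWitness_create_simulated_messages : List String × String := (["hi", "hello", "how are you?"], "user")

def Spec_create_simulated_messages (conv : List String) (last : String) (out : List (List (String × String))) : Prop := out = create_simulated_messages_alt conv last
instance (conv : List String) (last : String) (out : List (List (String × String))) : Decidable (Spec_create_simulated_messages conv last out) := by unfold Spec_create_simulated_messages; infer_instance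

-- ===== CLAIM (what is proved, stated in full; the proofs are below) =====
def Claim_equal_create_simulated_messages : Prop := ∀ (conv : List String) (last : String), Dom_create_simulated_messages conv last → Pre_create_simulated_messages conv last → Spec_create_simulated_messages conv last (create_simulated_messages conv last)

-- ===== LEMMAS AND PROOFS =====

lemma pyListMul_length {α : Type} (l : List α) (k : Nat) : (pyListMul l k).length = k * l.length := by
  simp [pyListMul]

lemma pyListMul_getElem {α : Type} (a b : α) (k j : Nat) (h : j < (pyListMul [a, b] k).length) :
    (pyListMul [a, b] k)[j] = if j % 2 = 0 then a else b := by
  induction k generalizing j with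
  | zero => simp [pyListMul] at h
  | succ k ih =>
    have : pyListMul [a, b] (k + 1) = a :: b :: pyListMul [a, b] k := by
      simp [pyListMul, List.replicate_succ]
    simp only [this] at h ⊢
    match j, h with
    | 0, _ => simp
    | 1, _ => simp
    | (j + 2), h =>
      have h2 : (a :: b :: pyListMul [a, b] k).length = (pyListMul [a, b] k).length + 2 := by
        simp
      have hc : (pyListMul [a, b] (k + 1)).length = (pyListMul [a, b] k).length + 2 := by
        simp [pyListMul_length]; ring
      have hj : j < (pyListMul [a, b] k).length := by
        simp only [List.length_cons] at h
        omega
      simp only [List.getElem_cons_succ]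
      rw [ih j hj]
      have hmod : (j + 2) % 2 = j % 2 := by omega
      rw [hmod]

lemma core_eq (conv : List String) (r0 r1 : String) :
    (((pyListMul [r0, r1] (conv.length / 2 + 1)).zip conv.reverse).reverse.map
        (fun rm => [("role", rm.1), ("content", rm.2)]))
      = conv.mapIdx (fun i msg =>
          [("role", if (conv.length - 1 - i) % 2 = 0 then r0 else r1), ("content", msg)]) := by
  have hlen : ((pyListMul [r0, r1] (conv.length / 2 + 1)).zip conv.reverse).length = conv.length := by
    simp [List.length_zip, pyListMul_length, Nat.min_def]
    omega
  apply List.ext_getElem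
  · simp [hlen]
  · intro i h1 h2
    have hi : i < conv.length := by simpa [hlen] using h2
    simp only [List.getElem_map, List.getElem_reverse, List.getElem_mapIdx, hlen]
    rw [List.getElem_zip]
    simp only [List.getElem_reverse]
    rw [pyListMul_getElem]
    have : conv.length - 1 - (conv.length - 1 - i) = i := by omega
    simp only [this]

theorem create_simulated_messages_spec : Claim_equal_create_simulated_messages := by
  intro conv last _ hpre
  unfold Spec_create_simulated_messages create_simulated_messages create_simulated_messages_alt
  rcases hpre with h | h
  · subst h
    simp only [reduceIte]
    exact core_eq conv "user" "assistant"
  · by_cases hu : last = "user"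
    · subst hu
      simp only [reduceIte]
      exact core_eq conv "user" "assistant"
    · subst h
      simp only [if_neg hu, reduceIte]
      exact core_eq conv "assistant" "user"
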